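-- pv_equiv track=rewrite | github.com/rainote2020/Linux_performance_test | sysbench_test.py | _parse_cpu_result
-- ===== SOURCE A (Python) =====
-- from typing import Dict, List, Optional, Tuple
--
-- def _parse_cpu_result(output: str) -> Dict:
--     """Parse CPU test results"""
--     lines = output.split("\n")
--     result = {"threads": None, "time": None, "events_per_second": None}
--
--     for line in lines:
--         if "Number of threads:" in line:
--             result["threads"] = line.split(":")[1].strip()
--         elif "total time:" in line:
--             result["time"] = line.split(":")[1].strip()
--         elif "events per second:" in line:
--             result["events_per_second"] = line.split(":")[1].strip()
--
--     return result
-- ===== SOURCE B (Python) =====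
-- _FIELDS = [
--     ("threads", "Number of threads:"),
--     ("time", "total time:"),
--     ("events_per_second", "events per second:"),
-- ]
--
--
-- def _parse_cpu_result(output: str) -> dict:
--     """Parse CPU test results: each field takes the last line containing its marker."""
--     lines = output.split("\n")
--     result = {}
--     for key, marker in _FIELDS:
--         matches = [line for line in lines if marker in line]
--         result[key] = matches[-1].split(":")[1].strip() if matches else None
--     return result
-- ===== Notes on version B (the rewrite author's own statement) =====
-- stated objective: alternative
-- what changed: Replaces the single forward if/elif pass with a table-driven per-field scan (filter the lines for each marker, take the last match); Pre_ excludes the degenerate inputs where one line contains two different markers, where A's elif chain assigns only the first field and B's independent scans fill both - either reading of such a line is defensible.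
import Mathlib
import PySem

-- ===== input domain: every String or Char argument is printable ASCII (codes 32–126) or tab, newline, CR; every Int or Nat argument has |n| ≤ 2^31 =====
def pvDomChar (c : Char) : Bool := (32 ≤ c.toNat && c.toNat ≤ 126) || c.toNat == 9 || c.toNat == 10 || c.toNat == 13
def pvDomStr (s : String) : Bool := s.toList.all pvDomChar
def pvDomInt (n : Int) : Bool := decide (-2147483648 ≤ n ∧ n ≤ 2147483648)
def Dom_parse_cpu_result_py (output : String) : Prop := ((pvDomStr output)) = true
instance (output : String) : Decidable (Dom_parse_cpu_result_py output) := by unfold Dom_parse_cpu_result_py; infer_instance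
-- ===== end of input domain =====

-- B replaces A's forward if/elif branch chain with a table-driven per-field scan
-- (filter the lines for each marker, take the last match); same cost, different decomposition.


-- ===== PORT A =====
-- line.split(":")[1].strip(); the '.getD' defaults are unreachable: the separator ":" is
-- never empty (split? = some) and every call site checked a marker containing ':' occurs
-- in line, so the split has ≥ 2 parts (no IndexError).
def pvGrab (line : String) : String :=
  PySem.Str.strip ((PySem.List.pyGet? ((PySem.Str.split? line ":").getD []) 1).getD "")

def pvStepADict (r : PySem.Dict String (Option String)) (line : String) :
    PySem.Dict String (Option String) :=
  if PySem.Str.isIn "Number of threads:" line then r.insert "threads" (some (pvGrab line))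
  else if PySem.Str.isIn "total time:" line then r.insert "time" (some (pvGrab line))
  else if PySem.Str.isIn "events per second:" line then
    r.insert "events_per_second" (some (pvGrab line))
  else r

def parse_cpu_result_py (output : String) : List (String × Option String) :=
  let lines := (PySem.Str.split? output "\n").getD []
  let result : PySem.Dict String (Option String) :=
    PySem.Dict.ofList [("threads", none), ("time", none), ("events_per_second", none)]
  (lines.foldl pvStepADict result).items

-- ===== PORT B =====
def pvFieldsB : List (String × String) :=
  [("threads", "Number of threads:"), ("time", "total time:"),
   ("events_per_second", "events per second:")]

-- 'matches[-1].split(":")[1].strip() if matches else None' over matches = filter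
def pvLastVal (lines : List String) (marker : String) : Option String :=
  match (lines.filter (fun l => PySem.Str.isIn marker l)).getLast? with
  | some l => some (pvGrab l)
  | none => none

def parse_cpu_result_py_alt (output : String) : List (String × Option String) :=
  let lines := (PySem.Str.split? output "\n").getD []
  (pvFieldsB.foldl (fun r kv => r.insert kv.1 (pvLastVal lines kv.2))
    (PySem.Dict.mk [])).items

-- ===== PRECONDITION & SPEC =====
-- Pre_ excludes the degenerate inputs where a single line contains two different markers:
-- there A's elif chain assigns only the first matching field while B's independent per-field
-- scans fill both — a corner where either reading of the line is defensible.
def Pre_parse_cpu_result_py (output : String) : Prop :=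
  ∀ l ∈ (PySem.Str.split? output "\n").getD [],
    (¬(PySem.Str.isIn "Number of threads:" l = true ∧ PySem.Str.isIn "total time:" l = true)) ∧
    (¬(PySem.Str.isIn "Number of threads:" l = true ∧ PySem.Str.isIn "events per second:" l = true)) ∧
    (¬(PySem.Str.isIn "total time:" l = true ∧ PySem.Str.isIn "events per second:" l = true))
instance (output : String) : Decidable (Pre_parse_cpu_result_py output) := by
  unfold Pre_parse_cpu_result_py; infer_instance

def pvWitness_parse_cpu_result_py : String :=
  "Number of threads: 4\ntotal time: 1.2s\nevents per second: 99"

def Spec_parse_cpu_result_py (output : String) (out : List (String × Option String)) : Prop := out = parse_cpu_result_py_alt output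
instance (output : String) (out : List (String × Option String)) : Decidable (Spec_parse_cpu_result_py output out) := by unfold Spec_parse_cpu_result_py; infer_instance

-- ===== CLAIM (what is proved, stated in full; the proofs are below) =====
def Claim_equal_parse_cpu_result_py : Prop := ∀ (output : String), Dom_parse_cpu_result_py output → Pre_parse_cpu_result_py output → Spec_parse_cpu_result_py output (parse_cpu_result_py output)

-- ===== LEMMAS AND PROOFS =====

-- the dict state always keeps the fixed shape [threads, time, events_per_second]
def pvMk3 (a b c : Option String) : PySem.Dict String (Option String) :=
  PySem.Dict.mk [("threads", a), ("time", b), ("events_per_second", c)]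

def pvT := Option String × Option String × Option String

def pvStepA' (s : pvT) (line : String) : pvT :=
  if PySem.Str.isIn "Number of threads:" line then (some (pvGrab line), s.2.1, s.2.2)
  else if PySem.Str.isIn "total time:" line then (s.1, some (pvGrab line), s.2.2)
  else if PySem.Str.isIn "events per second:" line then (s.1, s.2.1, some (pvGrab line))
  else s

-- keep-last overwrite fold for a single marker
def pvUpd (lines : List String) (marker : String) (x : Option String) : Option String :=
  lines.foldl (fun y l => if PySem.Str.isIn marker l then some (pvGrab l) else y) x

lemma pvStepADict_mk3 (a b c : Option String) (l : String) :
    pvStepADict (pvMk3 a b c) l =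
      pvMk3 (pvStepA' (a, b, c) l).1 (pvStepA' (a, b, c) l).2.1 (pvStepA' (a, b, c) l).2.2 := by
  unfold pvStepADict pvStepA'
  split_ifs <;> rfl

lemma pvFoldA_mk3 (lines : List String) (a b c : Option String) :
    lines.foldl pvStepADict (pvMk3 a b c) =
      pvMk3 (lines.foldl pvStepA' (a, b, c)).1 (lines.foldl pvStepA' (a, b, c)).2.1
        (lines.foldl pvStepA' (a, b, c)).2.2 := by
  induction lines generalizing a b c with
  | nil => rfl
  | cons l rest ih =>
    simp only [List.foldl_cons, pvStepADict_mk3]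
    rw [ih]
    rfl

-- the single-marker fold computes grab of the last matching line
lemma pvUpd_cons (l : String) (rest : List String) (marker : String) (x : Option String) :
    pvUpd (l :: rest) marker x =
      pvUpd rest marker (if PySem.Str.isIn marker l then some (pvGrab l) else x) := rfl

lemma pvUpd_eq_lastVal (lines : List String) (marker : String) (x : Option String) :
    pvUpd lines marker x =
      match (lines.filter (fun l => PySem.Str.isIn marker l)).getLast? with
      | some l => some (pvGrab l)
      | none => x := by
  induction lines generalizing x with
  | nil => rfl
  | cons l rest ih =>
    rw [pvUpd_cons, ih]
    by_cases hp : PySem.Str.isIn marker l = true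
    · rw [List.filter_cons_of_pos hp, if_pos hp, List.getLast?_cons]
      cases h : (rest.filter (fun l => PySem.Str.isIn marker l)).getLast? <;> simp
    · have hp' : PySem.Chars.isIn marker.toList l.toList = false := by simpa using hp
      rw [List.filter_cons_of_neg (by simp [hp']), if_neg (by simp [hp'])]

-- under marker exclusivity the branched fold is three independent keep-last folds
lemma pvFoldA_components (lines : List String)
    (h : ∀ l ∈ lines,
      (¬(PySem.Str.isIn "Number of threads:" l = true ∧ PySem.Str.isIn "total time:" l = true)) ∧
      (¬(PySem.Str.isIn "Number of threads:" l = true ∧ PySem.Str.isIn "events per second:" l = true)) ∧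
      (¬(PySem.Str.isIn "total time:" l = true ∧ PySem.Str.isIn "events per second:" l = true)))
    (a b c : Option String) :
    lines.foldl pvStepA' (a, b, c) =
      (pvUpd lines "Number of threads:" a, pvUpd lines "total time:" b,
       pvUpd lines "events per second:" c) := by
  induction lines generalizing a b c with
  | nil => rfl
  | cons l rest ih =>
    obtain ⟨h12, h13, h23⟩ := h l (List.mem_cons_self ..)
    have hrest := fun l hl => h l (List.mem_cons_of_mem _ hl)
    have IH := ih hrest
    simp only [List.foldl_cons, pvUpd_cons]
    by_cases h1 : PySem.Str.isIn "Number of threads:" l = true <;>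
      by_cases h2 : PySem.Str.isIn "total time:" l = true <;>
        by_cases h3 : PySem.Str.isIn "events per second:" l = true
    all_goals simp_all [pvStepA']

-- evaluate B's three-field fold into the explicit items list
lemma pvAltB_items (lines : List String) :
    (pvFieldsB.foldl (fun r kv => r.insert kv.1 (pvLastVal lines kv.2))
        (PySem.Dict.mk [])).items =
      [("threads", pvLastVal lines "Number of threads:"),
       ("time", pvLastVal lines "total time:"),
       ("events_per_second", pvLastVal lines "events per second:")] := by
  simp [pvFieldsB, PySem.Dict.insert, PySem.Dict.contains]

-- the combined equivalence over an abstract line list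
lemma pvMain (lines : List String)
    (h : ∀ l ∈ lines,
      (¬(PySem.Str.isIn "Number of threads:" l = true ∧ PySem.Str.isIn "total time:" l = true)) ∧
      (¬(PySem.Str.isIn "Number of threads:" l = true ∧ PySem.Str.isIn "events per second:" l = true)) ∧
      (¬(PySem.Str.isIn "total time:" l = true ∧ PySem.Str.isIn "events per second:" l = true))) :
    (lines.foldl pvStepADict
        (PySem.Dict.ofList [("threads", none), ("time", none), ("events_per_second", none)])).items =
      (pvFieldsB.foldl (fun r kv => r.insert kv.1 (pvLastVal lines kv.2))
        (PySem.Dict.mk [])).items := by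
  have h0 : PySem.Dict.ofList [("threads", (none : Option String)), ("time", none),
      ("events_per_second", none)] = pvMk3 none none none := by decide
  rw [h0, pvFoldA_mk3, pvFoldA_components _ h, pvAltB_items]
  simp only [pvMk3, pvUpd_eq_lastVal, pvLastVal]

-- ===== VERDICT (by name: the statement is the Claim_ definition above) =====
theorem parse_cpu_result_py_spec : Claim_equal_parse_cpu_result_py := by
  intro output _ hpre
  exact pvMain ((PySem.Str.split? output "\n").getD []) hpre
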